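-- pv_equiv track=rewrite | github.com/anushreeberlia/loom | services/outfit.py | infer_formality
-- ===== SOURCE A (Python) =====
-- FORMALITY_KEYWORDS = {
--     0: {"sneaker", "flip flop", "jogger", "shorts", "t-shirt", "tank", "hoodie", "sandal", "sweatpant", "sweatshirt"},
--     1: {"jeans", "flat", "loafer", "blouse", "shirt", "cardigan", "sweater", "skirt", "boot"},
--     2: {"heel", "pump", "stiletto", "clutch", "blazer", "trousers", "pencil", "gown", "dress shoe", "wedge"},
-- }
--
-- def infer_formality(item: dict) -> int:
--     """
--     Infer formality level from item name.
--     Returns: 0 (casual), 1 (smart_casual), 2 (dressy)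
--     """
--     if not item:
--         return 1  # Default to smart_casual
--
--     name_lower = item.get("name", "").lower()
--
--     # Check dressy first (highest specificity)
--     for kw in FORMALITY_KEYWORDS[2]:
--         if kw in name_lower:
--             return 2
--
--     # Check casual
--     for kw in FORMALITY_KEYWORDS[0]:
--         if kw in name_lower:
--             return 0
--
--     # Default to smart_casual
--     return 1
-- ===== SOURCE B (Python) =====
-- FORMALITY_KEYWORDS = {
--     0: {"sneaker", "flip flop", "jogger", "shorts", "t-shirt", "tank", "hoodie", "sandal", "sweatpant", "sweatshirt"},
--     1: {"jeans", "flat", "loafer", "blouse", "shirt", "cardigan", "sweater", "skirt", "boot"},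
--     2: {"heel", "pump", "stiletto", "clutch", "blazer", "trousers", "pencil", "gown", "dress shoe", "wedge"},
-- }
--
-- # Priority-ordered marker table (dressy markers first, then casual ones).
-- _MARKERS = [(kw, 2) for kw in FORMALITY_KEYWORDS[2]] + \
--            [(kw, 0) for kw in FORMALITY_KEYWORDS[0]]
--
--
-- def _match_at(s):
--     """Level of a marker keyword starting at the front of s, or None."""
--     for kw, lvl in _MARKERS:
--         if s.startswith(kw):
--             return lvl
--     return None
--
--
-- def infer_formality(item: dict) -> int:
--     """
--     Single left-to-right scan over the name: walk the suffixes of the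
--     lowercased name, matching keywords as prefixes at each position.
--     A dressy match ends the scan immediately; a casual match sets a flag.
--     """
--     if not item:
--         return 1
--     s = item.get("name", "").lower()
--     saw_casual = False
--     while s:
--         lvl = _match_at(s)
--         if lvl == 2:
--             return 2
--         saw_casual = saw_casual or lvl == 0
--         s = s[1:]
--     return 0 if saw_casual else 1
-- ===== Notes on version B (the rewrite author's own statement) =====
-- stated objective: alternative
-- what changed: Instead of A's per-tier substring searches ('kw in name' for each keyword), B makes one left-to-right walk over the suffixes of the name, matching keywords as prefixes at each position against a single priority-ordered marker table, with early exit on a dressy match and a flag for casual matches.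
import Mathlib
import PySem

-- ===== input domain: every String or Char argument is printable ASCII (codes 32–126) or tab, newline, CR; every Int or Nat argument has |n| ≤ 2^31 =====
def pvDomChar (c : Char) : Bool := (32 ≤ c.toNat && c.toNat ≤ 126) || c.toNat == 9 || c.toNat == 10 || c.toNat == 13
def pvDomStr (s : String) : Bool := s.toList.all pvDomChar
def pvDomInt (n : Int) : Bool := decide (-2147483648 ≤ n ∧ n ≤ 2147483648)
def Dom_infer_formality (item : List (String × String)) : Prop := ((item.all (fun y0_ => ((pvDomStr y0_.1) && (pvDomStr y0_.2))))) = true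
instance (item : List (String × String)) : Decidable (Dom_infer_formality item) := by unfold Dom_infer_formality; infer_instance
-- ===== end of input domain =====

-- B replaces A's per-tier substring searches by a single left-to-right walk over the
-- suffixes of the name, matching keywords as prefixes at each position (alternative, same cost).

-- ===== PORT A =====
-- FORMALITY_KEYWORDS[2] and [0] (set literals; distinct elements in insertion order)
def pvKW2 : List String :=
  ["heel", "pump", "stiletto", "clutch", "blazer", "trousers", "pencil", "gown", "dress shoe", "wedge"]
def pvKW0 : List String :=
  ["sneaker", "flip flop", "jogger", "shorts", "t-shirt", "tank", "hoodie", "sandal", "sweatpant", "sweatshirt"]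

-- 'for kw in kws: if kw in name_lower: return <hit>' — the loop as structural recursion
def pvScanA (kws : List String) (nameLower : String) : Bool :=
  match kws with
  | [] => false
  | kw :: rest => if PySem.Str.isIn kw nameLower then true else pvScanA rest nameLower

def infer_formality (item : List (String × String)) : Int :=
  if item = [] then 1
  else
    let nameLower := PySem.Str.lower (((item.lookup "name").getD ""))
    if pvScanA pvKW2 nameLower then 2
    else if pvScanA pvKW0 nameLower then 0
    else 1

-- ===== PORT B =====
-- _MARKERS = [(kw, 2) for kw in FORMALITY_KEYWORDS[2]] + [(kw, 0) for kw in FORMALITY_KEYWORDS[0]]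
def pvMarkers : List (String × Int) :=
  (pvKW2.map (fun kw => (kw, (2 : Int)))) ++ (pvKW0.map (fun kw => (kw, (0 : Int))))

-- _match_at(s): first marker keyword that is a prefix of s, its level; else None
def pvMatchAt (markers : List (String × Int)) (s : List Char) : Option Int :=
  match markers with
  | [] => none
  | (kw, lvl) :: rest =>
      if PySem.Chars.startswith s kw.toList then some lvl else pvMatchAt rest s

-- the 'while s:' suffix walk, with the saw_casual flag ('s = s[1:]' = tail)
def pvWalk (s : List Char) (sawCasual : Bool) : Int :=
  match s with
  | [] => if sawCasual then 0 else 1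
  | _ :: t =>
      let lvl := pvMatchAt pvMarkers s
      if lvl = some 2 then 2
      else pvWalk t (sawCasual || decide (lvl = some 0))

def infer_formality_alt (item : List (String × String)) : Int :=
  if item = [] then 1
  else pvWalk (PySem.Str.lower (((item.lookup "name").getD ""))).toList false

-- ===== PRECONDITION & SPEC =====
def Spec_infer_formality (item : List (String × String)) (out : Int) : Prop := out = infer_formality_alt item
instance (item : List (String × String)) (out : Int) : Decidable (Spec_infer_formality item out) := by unfold Spec_infer_formality; infer_instance

-- ===== CLAIM =====
def Claim_equal_infer_formality : Prop := ∀ (item : List (String × String)), Dom_infer_formality item → Spec_infer_formality item (infer_formality item)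

-- ===== LEMMAS AND PROOFS =====

-- 'any keyword of kws occurs as a substring of s', on the List Char level
def pvAnyIn (kws : List String) (s : List Char) : Bool :=
  kws.any (fun kw => PySem.Chars.isIn kw.toList s)

-- 'any keyword of kws is a prefix of s'
def pvAnyPre (kws : List String) (s : List Char) : Bool :=
  kws.any (fun kw => PySem.Chars.startswith s kw.toList)

theorem pvScanA_eq_anyIn (kws : List String) (n : String) :
    pvScanA kws n = pvAnyIn kws n.toList := by
  induction kws with
  | nil => rfl
  | cons kw rest ih => simp [pvScanA, pvAnyIn, ih, List.any_cons]

theorem isIn_cons (sub : List Char) (c : Char) (t : List Char) :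
    PySem.Chars.isIn sub (c :: t)
      = (PySem.Chars.startswith (c :: t) sub || PySem.Chars.isIn sub t) := by
  by_cases hp : sub <+: (c :: t)
  · rw [(PySem.Chars.startswith_iff (c :: t) sub).2 hp, Bool.true_or,
      (PySem.Chars.isIn_iff_infix sub (c :: t)).2 hp.isInfix]
  · have hs : PySem.Chars.startswith (c :: t) sub = false := by
      rw [← Bool.not_eq_true]; simpa [PySem.Chars.startswith_iff] using hp
    rw [hs, Bool.false_or]
    rcases h2 : PySem.Chars.isIn sub t with _ | _
    · rw [PySem.Chars.isIn_eq_false_iff] at h2 ⊢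
      rw [List.infix_cons_iff]; tauto
    · rw [PySem.Chars.isIn_iff_infix] at h2 ⊢
      exact h2.trans (List.suffix_cons c t).isInfix

theorem anyIn_cons (kws : List String) (c : Char) (t : List Char) :
    pvAnyIn kws (c :: t) = (pvAnyPre kws (c :: t) || pvAnyIn kws t) := by
  induction kws with
  | nil => rfl
  | cons kw rest ih =>
    simp only [pvAnyIn, pvAnyPre, List.any_cons] at *
    rw [isIn_cons, ih]
    cases PySem.Chars.startswith (c :: t) kw.toList <;>
      cases PySem.Chars.isIn kw.toList t <;> simp

-- characterization of _match_at on a block of constant-level markers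
theorem pvMatchAt_block (kws : List String) (lvl : Int) (rest : List (String × Int)) (s : List Char) :
    pvMatchAt (kws.map (fun kw => (kw, lvl)) ++ rest) s
      = if pvAnyPre kws s then some lvl else pvMatchAt rest s := by
  induction kws with
  | nil => simp [pvAnyPre]
  | cons kw kws ih =>
    cases h1 : PySem.Chars.startswith s kw.toList <;>
      simp [pvMatchAt, pvAnyPre, h1, ih, List.any_cons]

theorem pvWalk_eq (s : List Char) (b : Bool) :
    pvWalk s b = if pvAnyIn pvKW2 s then 2 else if (b || pvAnyIn pvKW0 s) then 0 else 1 := by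
  induction s generalizing b with
  | nil =>
    have h2 : pvAnyIn pvKW2 [] = false := by decide
    have h0 : pvAnyIn pvKW0 [] = false := by decide
    cases b <;> simp [pvWalk, h2, h0]
  | cons c t ih =>
    have hm : pvMatchAt pvMarkers (c :: t)
        = if pvAnyPre pvKW2 (c :: t) then some 2
          else if pvAnyPre pvKW0 (c :: t) then some (0 : Int) else none := by
      have h : pvMarkers
          = pvKW2.map (fun kw => (kw, (2 : Int)))
            ++ (pvKW0.map (fun kw => (kw, (0 : Int))) ++ []) := by simp [pvMarkers]
      rw [h, pvMatchAt_block, pvMatchAt_block]; rfl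
    rw [pvWalk, hm, anyIn_cons, anyIn_cons, ih]
    cases hA2 : pvAnyPre pvKW2 (c :: t) <;> cases hA0 : pvAnyPre pvKW0 (c :: t) <;>
      cases hI2 : pvAnyIn pvKW2 t <;> cases b <;> simp

-- ===== VERDICT =====
theorem infer_formality_spec : Claim_equal_infer_formality := by
  intro item _
  unfold Spec_infer_formality infer_formality infer_formality_alt
  split_ifs with h
  · rfl
  · rw [pvWalk_eq]
    simp only [pvScanA_eq_anyIn, Bool.false_or]
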